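-- pv_equiv track=rewrite | github.com/shokkergroup/ShokkerPaintBooth | _sort_registries.py | find_registry_bounds
-- ===== SOURCE A (Python) =====
-- def find_registry_bounds(lines, registry_name):
--     """Find start/end line indices of a dict-style registry."""
--     start = None
--     for i, L in enumerate(lines):
--         if registry_name in L and '=' in L and '{' in L:
--             start = i
--             break
--     if start is None:
--         return None, None
--
--     depth = 0
--     end = None
--     for j in range(start, len(lines)):
--         depth += lines[j].count('{') - lines[j].count('}')
--         if depth == 0:
--             end = j
--             break
--     return start, end
-- ===== SOURCE B (Python) =====
-- def find_registry_bounds(lines, registry_name):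
--     """Prefix-sum formulation: precompute cumulative brace balance, then search by equality."""
--     prefix = [0]
--     for L in lines:
--         prefix.append(prefix[-1] + L.count('{') - L.count('}'))
--     start = next((i for i, L in enumerate(lines)
--                   if registry_name in L and '=' in L and '{' in L), None)
--     if start is None:
--         return None, None
--     end = next((j for j in range(start, len(lines)) if prefix[j + 1] == prefix[start]), None)
--     return start, end
-- ===== Notes on version B (the rewrite author's own statement) =====
-- stated objective: alternative
-- what changed: Replaced A's running-depth accumulator loop with a precomputed prefix-sum table of brace balances; start and end are then found by generator searches, end being the first j >= start with prefix[j+1] == prefix[start].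
import Mathlib
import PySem

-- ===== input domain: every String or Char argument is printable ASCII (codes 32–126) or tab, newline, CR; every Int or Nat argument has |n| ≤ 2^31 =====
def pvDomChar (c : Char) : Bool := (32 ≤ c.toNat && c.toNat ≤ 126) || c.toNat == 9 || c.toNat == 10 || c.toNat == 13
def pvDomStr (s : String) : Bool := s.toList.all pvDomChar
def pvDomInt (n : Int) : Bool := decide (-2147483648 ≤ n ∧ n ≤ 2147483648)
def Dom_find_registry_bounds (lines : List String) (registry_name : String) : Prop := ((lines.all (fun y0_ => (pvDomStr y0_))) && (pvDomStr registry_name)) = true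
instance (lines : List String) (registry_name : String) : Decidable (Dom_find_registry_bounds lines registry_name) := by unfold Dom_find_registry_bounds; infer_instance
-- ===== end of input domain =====

-- B replaces A's running-depth loop with a precomputed prefix-sum table of brace balances; same cost.

-- ===== PORT A =====
-- first loop: 'for i, L in enumerate(lines): if name in L and '=' in L and '{' in L: start = i; break'
def pvAFindStart (lines : List String) (i : Nat) (name : String) : Option Nat :=
  match lines with
  | [] => none
  | L :: rest =>
      if PySem.Str.isIn name L && PySem.Str.isIn "=" L && PySem.Str.isIn "{" L then some i
      else pvAFindStart rest (i + 1) name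

-- second loop: 'for j in range(start, len(lines)): depth += lines[j].count('{') - lines[j].count('}'); if depth == 0: end = j; break'
-- lines[j] is ported as getD with j always in range (start ≤ j < len(lines)); exact there.
def pvALoop2 (lines : List String) (j n : Nat) (depth : Int) : Option Int :=
  if h : j < n then
    let d := depth + ((PySem.Str.count (lines.getD j "") "{" : Int) - (PySem.Str.count (lines.getD j "") "}" : Int))
    if d = 0 then some (j : Int) else pvALoop2 lines (j + 1) n d
  else none
termination_by n - j

def find_registry_bounds (lines : List String) (registry_name : String) : Option Int × Option Int :=
  match pvAFindStart lines 0 registry_name with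
  | none => (none, none)
  | some start => ((start : Int), pvALoop2 lines start lines.length 0)

-- ===== PORT B =====
def pvDelta (L : String) : Int := (PySem.Str.count L "{" : Int) - (PySem.Str.count L "}" : Int)

-- 'prefix = [0]; for L in lines: prefix.append(prefix[-1] + L.count('{') - L.count('}'))'
-- prefix[-1] ported as getLastD 0 (exact: the list is always nonempty)
def pvBPrefix (acc : List Int) (lines : List String) : List Int :=
  match lines with
  | [] => acc
  | L :: rest => pvBPrefix (acc ++ [acc.getLastD 0 + pvDelta L]) rest

-- 'next((i for i, L in enumerate(lines) if registry_name in L and '=' in L and '{' in L), None)'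
def pvBFindStart (lines : List String) (i : Nat) (name : String) : Option Nat :=
  match lines with
  | [] => none
  | L :: rest =>
      if PySem.Str.isIn name L && PySem.Str.isIn "=" L && PySem.Str.isIn "{" L then some i
      else pvBFindStart rest (i + 1) name

-- 'next((j for j in range(start, len(lines)) if prefix[j + 1] == prefix[start]), None)'
-- prefix[j+1], prefix[start] ported as getD (indices always in range)
def pvBFindEnd (pfx : List Int) (j n : Nat) (target : Int) : Option Int :=
  if h : j < n then
    if pfx.getD (j + 1) 0 = target then some (j : Int) else pvBFindEnd pfx (j + 1) n target
  else none
termination_by n - j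

def find_registry_bounds_alt (lines : List String) (registry_name : String) : Option Int × Option Int :=
  let pfx := pvBPrefix [0] lines
  match pvBFindStart lines 0 registry_name with
  | none => (none, none)
  | some s => ((s : Int), pvBFindEnd pfx s lines.length (pfx.getD s 0))

-- ===== PRECONDITION & SPEC =====
def Spec_find_registry_bounds (lines : List String) (registry_name : String) (out : Option Int × Option Int) : Prop := out = find_registry_bounds_alt lines registry_name
instance (lines : List String) (registry_name : String) (out : Option Int × Option Int) : Decidable (Spec_find_registry_bounds lines registry_name out) := by unfold Spec_find_registry_bounds; infer_instance

-- ===== CLAIM (what is proved, stated in full; the proofs are below) =====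
def Claim_equal_find_registry_bounds : Prop := ∀ (lines : List String) (registry_name : String), Dom_find_registry_bounds lines registry_name → Spec_find_registry_bounds lines registry_name (find_registry_bounds lines registry_name)

-- ===== LEMMAS AND PROOFS =====

-- spec-side scan of cumulative balances (proof helper only)
def pvScan (x : Int) (lines : List String) : List Int :=
  match lines with
  | [] => []
  | L :: rest => (x + pvDelta L) :: pvScan (x + pvDelta L) rest

theorem pvBPrefix_eq (lines : List String) : ∀ (acc : List Int),
    pvBPrefix acc lines = acc ++ pvScan (acc.getLastD 0) lines := by
  induction lines with
  | nil => intro acc; simp [pvBPrefix, pvScan]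
  | cons L rest ih =>
      intro acc
      rw [pvBPrefix, ih]
      simp [pvScan]

-- successive entries of the prefix table differ by the line's brace delta
theorem pvScan_step (lines : List String) : ∀ (x : Int) (j : Nat), j < lines.length →
    (x :: pvScan x lines).getD (j + 1) 0
      = (x :: pvScan x lines).getD j 0 + pvDelta (lines.getD j "") := by
  induction lines with
  | nil => intro x j h; simp at h
  | cons L rest ih =>
      intro x j h
      cases j with
      | zero => simp [pvScan]
      | succ j =>
          have h' : j < rest.length := by simpa using h
          have := ih (x + pvDelta L) j h'
          simpa [pvScan] using this

-- A's depth loop equals B's equality search in the prefix table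
theorem pvLoop_eq (lines : List String) (x : Int) : ∀ (j : Nat) (d : Int),
    pvALoop2 lines j lines.length d
      = pvBFindEnd (x :: pvScan x lines) j lines.length ((x :: pvScan x lines).getD j 0 - d) := by
  intro j d
  induction hn : lines.length - j generalizing j d with
  | zero =>
      have hj : ¬ j < lines.length := by omega
      rw [pvALoop2, pvBFindEnd, dif_neg hj, dif_neg hj]
  | succ k ih =>
      have hj : j < lines.length := by omega
      rw [pvALoop2, pvBFindEnd, dif_pos hj, dif_pos hj]
      have hstep := pvScan_step lines x j hj
      set P := x :: pvScan x lines
      have hcond : (P.getD (j + 1) 0 = P.getD j 0 - d)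
          ↔ (d + ((PySem.Str.count (lines.getD j "") "{" : Int)
                - (PySem.Str.count (lines.getD j "") "}" : Int)) = 0) := by
        rw [hstep]; unfold pvDelta; constructor <;> intro h <;> omega
      by_cases hz : d + ((PySem.Str.count (lines.getD j "") "{" : Int)
          - (PySem.Str.count (lines.getD j "") "}" : Int)) = 0
      · simp only [hz, hcond.mpr hz, if_pos]
      · have hnz : ¬ (P.getD (j + 1) 0 = P.getD j 0 - d) := fun h => hz (hcond.mp h)
        simp only [hz, hnz, reduceIte]
        have htar : P.getD j 0 - d
            = P.getD (j + 1) 0 - (d + pvDelta (lines.getD j "")) := by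
          rw [hstep]; ring
        rw [ih (j + 1) (d + ((PySem.Str.count (lines.getD j "") "{" : Int)
              - (PySem.Str.count (lines.getD j "") "}" : Int))) (by omega)]
        unfold pvDelta at htar
        rw [htar]
  
-- the two start searches are the same recursion
theorem pvFindStart_eq (lines : List String) : ∀ (i : Nat) (name : String),
    pvAFindStart lines i name = pvBFindStart lines i name := by
  induction lines with
  | nil => intro i name; rfl
  | cons L rest ih =>
      intro i name
      rw [pvAFindStart, pvBFindStart]
      split_ifs with h
      · rfl
      · exact ih (i + 1) name

-- ===== VERDICT (by name: the statement is the Claim_ definition above) =====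
theorem find_registry_bounds_spec : Claim_equal_find_registry_bounds := by
  intro lines name _
  unfold Spec_find_registry_bounds find_registry_bounds find_registry_bounds_alt
  rw [pvFindStart_eq]
  cases h : pvBFindStart lines 0 name with
  | none => rfl
  | some s =>
      simp only
      have hP : pvBPrefix [0] lines = (0 : Int) :: pvScan 0 lines := by
        rw [pvBPrefix_eq]; rfl
      rw [hP]
      have := pvLoop_eq lines 0 s 0
      rw [this]
      norm_num
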